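-- pv_equiv track=rewrite | github.com/jiangyuwei666/my-study-demo | Algorithm/sword of offer/9.变态跳台阶.py | crazy_jump
-- ===== SOURCE A (Python) =====
-- def crazy_jump(n):
--     if n <= 1:
--         return n
--     else:
--         result = 1
--         for i in range(1, n):
--               result = result * 2
--
--     return result
-- ===== SOURCE B (Python) =====
-- def crazy_jump(n):
--     if n <= 1:
--         return n
--     return 1 << (n - 1)
-- ===== Notes on version B (the rewrite author's own statement) =====
-- stated objective: idiomatic
-- what changed: Replaced the accumulating doubling loop with the closed-form bit shift 1 << (n-1).
import Mathlib
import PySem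

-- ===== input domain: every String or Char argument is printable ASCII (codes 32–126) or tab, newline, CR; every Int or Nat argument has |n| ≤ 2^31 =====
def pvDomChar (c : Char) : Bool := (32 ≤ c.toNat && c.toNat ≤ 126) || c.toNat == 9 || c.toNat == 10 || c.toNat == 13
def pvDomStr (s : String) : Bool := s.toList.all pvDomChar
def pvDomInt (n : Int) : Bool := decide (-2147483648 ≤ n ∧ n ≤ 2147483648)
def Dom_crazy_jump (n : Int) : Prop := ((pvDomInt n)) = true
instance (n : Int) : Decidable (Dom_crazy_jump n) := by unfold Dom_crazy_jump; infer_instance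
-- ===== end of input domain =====

-- B replaces A's doubling loop by the closed-form shift 1 << (n-1); idiomatic/faster by algorithm.

-- ===== PORT A =====
def crazy_jump (n : Int) : Int :=
  if n ≤ 1 then n
  else (PySem.List.pyRange 1 n 1).foldl (fun result _ => result * 2) 1

-- ===== PORT B =====
def crazy_jump_alt (n : Int) : Int :=
  if n ≤ 1 then n
  else (1 : Int) <<< (n - 1).toNat   -- 1 << (n-1); n ≥ 2 here so n-1 ≥ 1 and toNat is exact

-- ===== PRECONDITION & SPEC =====
def Spec_crazy_jump (n : Int) (out : Int) : Prop := out = crazy_jump_alt n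
instance (n : Int) (out : Int) : Decidable (Spec_crazy_jump n out) := by unfold Spec_crazy_jump; infer_instance

-- ===== CLAIM (what is proved, stated in full; the proofs are below) =====
def Claim_equal_crazy_jump : Prop := ∀ (n : Int), Dom_crazy_jump n → Spec_crazy_jump n (crazy_jump n)

-- ===== LEMMAS AND PROOFS =====
lemma double_foldl (l : List Int) (r : Int) :
    l.foldl (fun result _ => result * 2) r = r * 2 ^ l.length := by
  induction l generalizing r with
  | nil => simp
  | cons a t ih => simp [List.foldl, ih, pow_succ]; ring

-- ===== VERDICT (by name: the statement is the Claim_ definition above) =====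
theorem crazy_jump_spec : Claim_equal_crazy_jump := by
  intro n _
  unfold Spec_crazy_jump crazy_jump crazy_jump_alt
  split_ifs with h
  · rfl
  · rw [double_foldl, PySem.List.length_pyRange_one, Int.shiftLeft_eq, one_mul]
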